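-- pv_equiv track=rewrite | github.com/RobertoTarta/Master-s-Thesis---SMT-Solver | DPLL.py | propagate_units
-- ===== SOURCE A (Python) =====
-- def contains_empty_clause(clauses):
--     return any(len(clause) == 0 for clause in clauses)
--
-- def propagate_units(clauses):
--     assignments = {}
--
--     while True:
--         # find all unit clauses (only one literal)
--         unit_clauses = [clause for clause in clauses if len(clause) == 1]
--
--         if not unit_clauses:
--             break
--
--         for unit in unit_clauses:
--             literal = unit[0]
--             var = abs(literal)
--             value = literal > 0
--
--             # check for conflicts in existing assignments
--             if var in assignments and assignments[var] != value:
--                 return None, []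
--
--             assignments[var] = value
--
--             # simplify clauses by removing satisfied clauses and literals
--             new_clauses = []
--             for clause in clauses:
--                 if literal in clause:
--                     continue
--                 if -literal in clause:
--                     clause = [lit for lit in clause if lit != -literal]
--                 new_clauses.append(clause)
--             clauses = new_clauses
--
--         if contains_empty_clause(clauses):
--             return None, []
--
--     return assignments, clauses
-- ===== SOURCE B (Python) =====
-- def propagate_units(clauses):
--     assignments = {}
--     while True:
--         units = [c[0] for c in clauses if len(c) == 1]
--         if not units:
--             return assignments, clauses
--         unit_set = set(units)
--         if any(l > 0 and -l in unit_set for l in units):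
--             return None, []
--         for l in units:
--             assignments[abs(l)] = l > 0
--         clauses = [[t for t in c if -t not in unit_set]
--                    for c in clauses if not any(l in unit_set for l in c)]
--         if any(len(c) == 0 for c in clauses):
--             return None, []
-- ===== Notes on version B (the rewrite author's own statement) =====
-- stated objective: alternative
-- what changed: Instead of rescanning the whole clause list once per unit clause, B collects all unit literals of a round, checks them for a complementary pair, records the assignments, and simplifies every clause in a single batched pass against the set of this round's unit literals.
import Mathlib
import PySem

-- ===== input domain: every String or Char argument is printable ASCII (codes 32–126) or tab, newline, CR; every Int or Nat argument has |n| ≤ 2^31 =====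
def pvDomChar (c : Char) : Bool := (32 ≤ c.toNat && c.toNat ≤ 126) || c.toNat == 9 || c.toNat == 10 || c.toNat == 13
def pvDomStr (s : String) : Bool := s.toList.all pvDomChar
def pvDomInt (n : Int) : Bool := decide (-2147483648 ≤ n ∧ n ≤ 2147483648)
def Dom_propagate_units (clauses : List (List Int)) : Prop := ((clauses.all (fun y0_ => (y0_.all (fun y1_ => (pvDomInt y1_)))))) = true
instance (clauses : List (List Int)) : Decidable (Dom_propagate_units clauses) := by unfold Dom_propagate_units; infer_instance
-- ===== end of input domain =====

-- B replaces A's per-unit full rescan of the clause list by one batched simplification per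
-- propagation round over the set of that round's unit literals (objective: alternative algorithm).

-- ===== PORT A =====
-- the inner 'for clause in clauses' simplification loop of A
def pvSimpA (literal : Int) : List (List Int) → List (List Int)
  | [] => []
  | c :: cs =>
    if literal ∈ c then pvSimpA literal cs
    else (if -literal ∈ c then c.filter (fun lit => !(lit == -literal)) else c) :: pvSimpA literal cs

-- the 'for unit in unit_clauses' loop; 'none' = the 'return None, []' inside it.
-- unit[0]: every element of unit_clauses has length 1, so headI is exact here.
def pvProcA (units : List (List Int)) (asg : PySem.Dict Int Bool) (clauses : List (List Int)) :
    Option (PySem.Dict Int Bool × List (List Int)) :=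
  match units with
  | [] => some (asg, clauses)
  | u :: us =>
    let literal := u.headI
    let var : Int := |literal|
    let value : Bool := decide (literal > 0)
    if (match asg.get? var with | some v => v != value | none => false) then none
    else pvProcA us (asg.insert var value) (pvSimpA literal clauses)

-- the 'while True' loop with fuel clauses.length + 1; each continuing round removes at least
-- one clause, so the fuel is never exhausted (and both ports use the same fuel scheme).
def pvLoopA : Nat → PySem.Dict Int Bool → List (List Int) → (Option (List (Int × Bool))) × List (List Int)
  | 0, _, _ => (none, [])
  | f + 1, asg, clauses =>
    let units := clauses.filter (fun c => c.length == 1)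
    if units.isEmpty then (some asg.items, clauses)
    else
      match pvProcA units asg clauses with
      | none => (none, [])
      | some (asg', cl') =>
        if cl'.any (fun c => c.length == 0) then (none, []) else pvLoopA f asg' cl'

def propagate_units (clauses : List (List Int)) : (Option (List (Int × Bool))) × List (List Int) :=
  pvLoopA (clauses.length + 1) PySem.Dict.empty clauses

-- ===== PORT B =====
-- one batched round per iteration (Source B's while loop), same fuel scheme
def pvLoopB : Nat → PySem.Dict Int Bool → List (List Int) → (Option (List (Int × Bool))) × List (List Int)
  | 0, _, _ => (none, [])
  | f + 1, asg, clauses =>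
    let units := (clauses.filter (fun c => c.length == 1)).map (fun c => c.headI)
    if units.isEmpty then (some asg.items, clauses)
    else
      let unitSet : PySem.Set Int := PySem.Set.ofList units
      if units.any (fun l => decide (l > 0) && PySem.Set.contains unitSet (-l)) then (none, [])
      else
        let asg' := units.foldl (fun a l => a.insert |l| (decide (l > 0))) asg
        let cl' := (clauses.filter (fun c => !(c.any (fun l => PySem.Set.contains unitSet l)))).map
                     (fun c => c.filter (fun t => !(PySem.Set.contains unitSet (-t))))
        if cl'.any (fun c => c.length == 0) then (none, []) else pvLoopB f asg' cl'

def propagate_units_alt (clauses : List (List Int)) : (Option (List (Int × Bool))) × List (List Int) :=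
  pvLoopB (clauses.length + 1) PySem.Dict.empty clauses

-- ===== PRECONDITION & SPEC =====
def Spec_propagate_units (clauses : List (List Int)) (out : (Option (List (Int × Bool))) × List (List Int)) : Prop := out = propagate_units_alt clauses
instance (clauses : List (List Int)) (out : (Option (List (Int × Bool))) × List (List Int)) : Decidable (Spec_propagate_units clauses out) := by unfold Spec_propagate_units; infer_instance

-- ===== CLAIM (what is proved, stated in full; the proofs are below) =====
def Claim_equal_propagate_units : Prop := ∀ (clauses : List (List Int)), Dom_propagate_units clauses → Spec_propagate_units clauses (propagate_units clauses)

-- ===== LEMMAS AND PROOFS =====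


def pvConf (asg : PySem.Dict Int Bool) : List Int → Bool
  | [] => false
  | l :: ls =>
    (match asg.get? |l| with | some v => v != decide (l > 0) | none => false)
    || pvConf (asg.insert |l| (decide (l > 0))) ls

theorem pvSetContains_ofList (U : List Int) (x : Int) :
    PySem.Set.contains (PySem.Set.ofList U) x = decide (x ∈ U) := by
  by_cases h : x ∈ U
  · simp [h]
  · have : ¬ PySem.Set.contains (PySem.Set.ofList U) x = true :=
      fun hc => h ((PySem.Set.mem_ofList _ _).mp ((PySem.Set.contains_iff _ _).mp hc))
    simp_all

theorem pvS_step (S : List Int) (l : Int)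
    (hS : ∀ p ∈ S, ∀ q ∈ S, |p| = |q| → decide (p > 0) = decide (q > 0))
    (hcons : ∀ p ∈ S, |p| = |l| → decide (p > 0) = decide (l > 0)) :
    ∀ p ∈ S ++ [l], ∀ q ∈ S ++ [l], |p| = |q| → decide (p > 0) = decide (q > 0) := by
  intro p hp q hq habs
  rcases List.mem_append.mp hp with hp' | hp' <;> rcases List.mem_append.mp hq with hq' | hq'
  · exact hS p hp' q hq' habs
  · obtain rfl : q = l := List.mem_singleton.mp hq'
    exact hcons p hp' habs
  · obtain rfl : p = l := List.mem_singleton.mp hp'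
    exact (hcons q hq' habs.symm).symm
  · obtain rfl : p = l := List.mem_singleton.mp hp'
    obtain rfl := List.mem_singleton.mp hq'
    rfl

theorem pvGet_step (ls S : List Int) (asg : PySem.Dict Int Bool) (l : Int)
    (hget : ∀ x ∈ l :: ls, (asg.get? |x| = none ∧ ∀ p ∈ S, |p| ≠ |x|) ∨
        (∃ p ∈ S, |p| = |x| ∧ asg.get? |x| = some (decide (p > 0)))) :
    ∀ x ∈ ls, ((asg.insert |l| (decide (l > 0))).get? |x| = none ∧ ∀ p ∈ S ++ [l], |p| ≠ |x|) ∨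
        (∃ p ∈ S ++ [l], |p| = |x| ∧ (asg.insert |l| (decide (l > 0))).get? |x| = some (decide (p > 0))) := by
  intro x hx
  by_cases hxl : |x| = |l|
  · right
    refine ⟨l, List.mem_append_right _ (List.mem_singleton.mpr rfl), hxl.symm, ?_⟩
    rw [hxl]; exact PySem.Dict.get?_insert_self ..
  · have hrw : (asg.insert |l| (decide (l > 0))).get? |x| = asg.get? |x| :=
      PySem.Dict.get?_insert_of_ne _ _ hxl
    rcases hget x (List.mem_cons_of_mem _ hx) with ⟨hno, hns⟩ | ⟨p, hp, habs, hg⟩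
    · left
      refine ⟨hrw.trans hno, ?_⟩
      intro p hp
      rcases List.mem_append.mp hp with h | h
      · exact hns p h
      · rw [List.mem_singleton] at h; subst h; exact fun he => hxl (he.symm)
    · right
      exact ⟨p, List.mem_append_left _ hp, habs, hrw.trans hg⟩

theorem pvEx_step (ls S : List Int) (l : Int)
    (hhead : ∀ p ∈ S, |p| = |l| → decide (p > 0) = decide (l > 0)) :
    ((∃ x ∈ ls, ∃ p ∈ S ++ [l] ++ ls, |p| = |x| ∧ decide (p > 0) ≠ decide (x > 0)) ↔
     (∃ x ∈ l :: ls, ∃ p ∈ S ++ l :: ls, |p| = |x| ∧ decide (p > 0) ≠ decide (x > 0))) := by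
  have hmem : ∀ y : Int, y ∈ S ++ [l] ++ ls ↔ y ∈ S ++ l :: ls := by
    intro y
    simp only [List.mem_append, List.mem_cons]
    tauto
  constructor
  · rintro ⟨x, hx, p, hp, habs, hne⟩
    exact ⟨x, List.mem_cons_of_mem _ hx, p, (hmem p).mp hp, habs, hne⟩
  · rintro ⟨x, hx, p, hp, habs, hne⟩
    rcases List.mem_cons.mp hx with rfl | hx
    · rcases List.mem_append.mp hp with h | h
      · exact absurd (hhead p h habs) hne
      · rcases List.mem_cons.mp h with rfl | h
        · exact absurd rfl hne
        · refine ⟨p, h, x, ?_, habs.symm, hne.symm⟩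
          exact (hmem x).mpr (List.mem_append_right _ (List.mem_cons_self ..))
    · exact ⟨x, hx, p, (hmem p).mpr hp, habs, hne⟩

theorem pvConf_aux (ls : List Int) : ∀ (S : List Int) (asg : PySem.Dict Int Bool),
    (∀ p ∈ S, ∀ q ∈ S, |p| = |q| → decide (p > 0) = decide (q > 0)) →
    (∀ x ∈ ls, (asg.get? |x| = none ∧ ∀ p ∈ S, |p| ≠ |x|) ∨
        (∃ p ∈ S, |p| = |x| ∧ asg.get? |x| = some (decide (p > 0)))) →
    (pvConf asg ls = true ↔
      ∃ x ∈ ls, ∃ p ∈ S ++ ls, |p| = |x| ∧ decide (p > 0) ≠ decide (x > 0)) := by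
  induction ls with
  | nil => intro S asg _ _; simp [pvConf]
  | cons l ls ih =>
    intro S asg hS hget
    rcases hget l (List.mem_cons_self ..) with ⟨hnone, hnoS⟩ | ⟨p, hpS, hpabs, hpget⟩
    · have hcons : ∀ p ∈ S, |p| = |l| → decide (p > 0) = decide (l > 0) :=
        fun p hp habs => absurd habs (hnoS p hp)
      have hrec := ih (S ++ [l]) (asg.insert |l| (decide (l > 0)))
        (pvS_step S l hS hcons) (pvGet_step ls S asg l hget)
      simp only [pvConf, hnone, Bool.false_or]
      rw [hrec]
      exact pvEx_step ls S l hcons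
    · by_cases hsame : decide (p > 0) = decide (l > 0)
      · have hcons : ∀ q ∈ S, |q| = |l| → decide (q > 0) = decide (l > 0) := by
          intro q hq habs
          exact (hS q hq p hpS (habs.trans hpabs.symm)).trans hsame
        have hrec := ih (S ++ [l]) (asg.insert |l| (decide (l > 0)))
          (pvS_step S l hS hcons) (pvGet_step ls S asg l hget)
        simp only [pvConf, hpget, hsame, bne_self_eq_false, Bool.false_or]
        rw [hrec]
        exact pvEx_step ls S l hcons
      · have hlhs : pvConf asg (l :: ls) = true := by
          simp only [pvConf, hpget, Bool.or_eq_true, bne_iff_ne]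
          exact Or.inl hsame
        rw [hlhs]
        simp only [true_iff]
        exact ⟨l, List.mem_cons_self .., p, List.mem_append_left _ hpS, hpabs, hsame⟩

theorem pvConf_eq_any (ls : List Int) (asg : PySem.Dict Int Bool)
    (h0 : ∀ x ∈ ls, asg.get? |x| = none) :
    pvConf asg ls = ls.any (fun l => decide (l > 0) && decide ((-l) ∈ ls)) := by
  have h := pvConf_aux ls [] asg (by simp) (fun x hx => Or.inl ⟨h0 x hx, by simp⟩)
  simp only [List.nil_append] at h
  rw [Bool.eq_iff_iff, h, List.any_eq_true]
  constructor
  · rintro ⟨x, hx, p, hp, habs, hne⟩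
    rcases abs_eq_abs.mp habs with rfl | rfl
    · exact absurd rfl hne
    · by_cases hx0 : x > 0
      · refine ⟨x, hx, ?_⟩
        simp only [Bool.and_eq_true, decide_eq_true_eq]
        exact ⟨hx0, hp⟩
      · have hnx : -x > 0 := by
          by_contra hnx
          exact hne ((decide_eq_false hnx).trans (decide_eq_false hx0).symm)
        refine ⟨-x, hp, ?_⟩
        simp only [Bool.and_eq_true, decide_eq_true_eq, neg_neg]
        exact ⟨hnx, hx⟩
  · rintro ⟨l, hl, hcond⟩
    simp only [Bool.and_eq_true, decide_eq_true_eq] at hcond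
    refine ⟨l, hl, -l, hcond.2, abs_neg l, ?_⟩
    have h1 : decide (l > 0) = true := decide_eq_true hcond.1
    have h2 : decide (-l > 0) = false := decide_eq_false (by omega)
    rw [h1, h2]
    exact Bool.false_ne_true

theorem pvBat_step (l : Int) (U : List Int) (hl : l ≠ 0 → (-l) ∉ U) (cl : List (List Int)) :
    ((pvSimpA l cl).filter (fun c => !(c.any (fun m => decide (m ∈ U))))).map
        (fun c => c.filter (fun t => !(decide ((-t) ∈ U)))) =
    (cl.filter (fun c => !(c.any (fun m => decide (m ∈ (l :: U)))))).map
        (fun c => c.filter (fun t => !(decide ((-t) ∈ (l :: U))))) := by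
  induction cl with
  | nil => rfl
  | cons c cs ih =>
    simp only [pvSimpA]
    by_cases hlc : l ∈ c
    · rw [if_pos hlc]
      have hdrop : (c.any (fun m => decide (m ∈ (l :: U)))) = true :=
        List.any_eq_true.mpr ⟨l, hlc, by simp⟩
      have h2 : (!(c.any (fun m => decide (m ∈ (l :: U))))) = false := by rw [hdrop]; rfl
      rw [List.filter_cons, h2]
      simp only [Bool.false_eq_true, if_false]
      exact ih
    · rw [if_neg hlc]
      have hmemc' : ∀ m : Int, m ∈ U →
          ((m ∈ if -l ∈ c then c.filter (fun lit => !(lit == -l)) else c) ↔ m ∈ c) := by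
        intro m hmU
        by_cases hneg : -l ∈ c
        · rw [if_pos hneg]
          by_cases hl0 : l = 0
          · exact absurd (by simpa [hl0] using hneg) (by simpa [hl0] using hlc)
          · have hm : m ≠ -l := fun h => (hl hl0) (h ▸ hmU)
            simp [List.mem_filter, hm]
        · rw [if_neg hneg]
      have hany : ((if -l ∈ c then c.filter (fun lit => !(lit == -l)) else c).any
            (fun m => decide (m ∈ U))) = (c.any (fun m => decide (m ∈ (l :: U)))) := by
        rw [Bool.eq_iff_iff, List.any_eq_true, List.any_eq_true]
        constructor
        · rintro ⟨m, hm, hmU⟩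
          rw [decide_eq_true_eq] at hmU
          exact ⟨m, (hmemc' m hmU).mp hm, by simp [hmU]⟩
        · rintro ⟨m, hm, hmU⟩
          rw [decide_eq_true_eq, List.mem_cons] at hmU
          rcases hmU with rfl | hmU
          · exact absurd hm hlc
          · exact ⟨m, (hmemc' m hmU).mpr hm, by simp [hmU]⟩
      by_cases hkeep : (c.any (fun m => decide (m ∈ (l :: U)))) = true
      · have h1 : (!((if -l ∈ c then c.filter (fun lit => !(lit == -l)) else c).any
            (fun m => decide (m ∈ U)))) = false := by rw [hany, hkeep]; rfl
        have h2 : (!(c.any (fun m => decide (m ∈ (l :: U))))) = false := by rw [hkeep]; rfl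
        rw [List.filter_cons, List.filter_cons, h1, h2]
        simp only [Bool.false_eq_true, if_false]
        exact ih
      · have hkf := eq_false_of_ne_true hkeep
        have h1 : (!((if -l ∈ c then c.filter (fun lit => !(lit == -l)) else c).any
            (fun m => decide (m ∈ U)))) = true := by rw [hany, hkf]; rfl
        have h2 : (!(c.any (fun m => decide (m ∈ (l :: U))))) = true := by rw [hkf]; rfl
        rw [List.filter_cons, List.filter_cons, h1, h2]
        simp only [if_true]
        simp only [List.map_cons]
        rw [ih]
        congr 1
        by_cases hneg : -l ∈ c
        · rw [if_pos hneg, List.filter_filter]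
          apply List.filter_congr
          intro t _
          by_cases ha : t = -l
          · have hb : -t = l := by omega
            simp [ha]
          · have hb : -t ≠ l := by omega
            simp [ha, hb]
        · rw [if_neg hneg]
          apply List.filter_congr
          intro t ht
          have hb : -t ≠ l := fun h => hneg (by rw [show (-l) = t by omega]; exact ht)
          simp [hb]

theorem pvFoldl_simpA (U : List Int) : ∀ cl : List (List Int),
    (∀ l ∈ U, l ≠ 0 → (-l) ∉ U) →
    U.foldl (fun c l => pvSimpA l c) cl =
      (cl.filter (fun c => !(c.any (fun m => decide (m ∈ U))))).map
        (fun c => c.filter (fun t => !(decide ((-t) ∈ U)))) := by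
  induction U with
  | nil =>
    intro cl _
    rw [List.foldl_nil,
      show (fun (c : List Int) => !(c.any (fun m => decide (m ∈ ([] : List Int))))) = fun _ => true
        from funext (fun c => by simp),
      List.filter_true,
      show (fun (c : List Int) => c.filter (fun t => !(decide ((-t) ∈ ([] : List Int))))) = fun c => c
        from funext (fun c => by simp)]
    exact (List.map_id' cl).symm
  | cons l U ih =>
    intro cl hU
    rw [List.foldl_cons,
      ih (pvSimpA l cl) (fun m hm hm0 hc => hU m (List.mem_cons_of_mem _ hm) hm0 (List.mem_cons_of_mem _ hc))]
    exact pvBat_step l U (fun h0 hc => hU l (List.mem_cons_self ..) h0 (List.mem_cons_of_mem _ hc)) cl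

theorem pvGet_foldl_insert (U : List Int) : ∀ (asg : PySem.Dict Int Bool) (v : Int),
    (∀ m ∈ U, |m| ≠ v) →
    (U.foldl (fun a l => a.insert |l| (decide (l > 0))) asg).get? v = asg.get? v := by
  induction U with
  | nil => intro asg v _; rfl
  | cons l U ih =>
    intro asg v h
    rw [List.foldl_cons, ih _ v (fun m hm => h m (List.mem_cons_of_mem _ hm)),
      PySem.Dict.get?_insert_of_ne _ _ (fun he => h l (List.mem_cons_self ..) he.symm)]



theorem pvProcA_eq (units : List (List Int)) (asg : PySem.Dict Int Bool) (cl : List (List Int)) :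
    pvProcA units asg cl =
      if pvConf asg (units.map (fun u => u.headI)) then none
      else some (units.foldl (fun a u => a.insert |u.headI| (decide (u.headI > 0))) asg,
                 units.foldl (fun c u => pvSimpA u.headI c) cl) := by
  induction units generalizing asg cl with
  | nil => rfl
  | cons u us ih =>
    simp only [pvProcA, pvConf, List.map_cons, List.foldl_cons]
    cases h : asg.get? |u.headI| with
    | none => simp [ih]
    | some v =>
      by_cases hv : v = decide (u.headI > 0)
      · simp [hv, ih]
      · simp [hv, bne_iff_ne]

def pvInv (asg : PySem.Dict Int Bool) (cl : List (List Int)) : Prop :=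
  ∀ c ∈ cl, ∀ x ∈ c, asg.get? |x| = none

theorem pvInv_step (U : List Int) (asg : PySem.Dict Int Bool) (cl : List (List Int))
    (hInv : pvInv asg cl) :
    pvInv (U.foldl (fun a l => a.insert |l| (decide (l > 0))) asg)
      ((cl.filter (fun c => !(c.any (fun m => decide (m ∈ U))))).map
        (fun c => c.filter (fun t => !(decide ((-t) ∈ U))))) := by
  intro c' hc' x hx
  obtain ⟨c, hc, rfl⟩ := List.mem_map.mp hc'
  have hcf := List.mem_filter.mp hc
  have hxc := List.mem_filter.mp hx
  have hxU : x ∉ U := by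
    intro hxU
    have hany : (c.any (fun m => decide (m ∈ U))) = true :=
      List.any_eq_true.mpr ⟨x, hxc.1, decide_eq_true hxU⟩
    have := hcf.2
    rw [hany] at this
    simp at this
  have hnxU : -x ∉ U := by
    intro h
    have := hxc.2
    simp [h] at this
  rw [pvGet_foldl_insert U asg _ ?_]
  · exact hInv c hcf.1 x hxc.1
  · intro m hm habs
    rcases abs_eq_abs.mp habs with rfl | rfl
    · exact hxU hm
    · exact hnxU (by simpa using hm)

theorem pvLoop_eq : ∀ (f : Nat) (asg : PySem.Dict Int Bool) (cl : List (List Int)),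
    pvInv asg cl → pvLoopA f asg cl = pvLoopB f asg cl := by
  intro f
  induction f with
  | zero => intro asg cl _; rfl
  | succ f ih =>
    intro asg cl hInv
    simp only [pvLoopA, pvLoopB, pvSetContains_ofList, List.isEmpty_map]
    by_cases hempty : (cl.filter (fun c => c.length == 1)).isEmpty = true
    · rw [if_pos hempty, if_pos hempty]
    · rw [if_neg hempty, if_neg hempty]
      have hunit1 : ∀ u ∈ cl.filter (fun c => c.length == 1), u = [u.headI] := by
        intro u hu
        have h1 := (List.mem_filter.mp hu).2
        match u with
        | [x] => rfl
        | [] => simp at h1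
        | x :: y :: r => simp at h1
      have h0 : ∀ x ∈ (cl.filter (fun c => c.length == 1)).map (fun c => c.headI),
          asg.get? |x| = none := by
        intro x hx
        obtain ⟨u, hu, rfl⟩ := List.mem_map.mp hx
        have hmemu : u.headI ∈ u := by
          rw [hunit1 u hu]
          simp
        exact hInv u (List.mem_filter.mp hu).1 _ hmemu
      rw [pvProcA_eq, pvConf_eq_any _ _ h0]
      by_cases hconf : (((cl.filter (fun c => c.length == 1)).map (fun c => c.headI)).any
          (fun l => decide (l > 0) &&
            decide ((-l) ∈ (cl.filter (fun c => c.length == 1)).map (fun c => c.headI)))) = true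
      · rw [if_pos hconf, if_pos hconf]
      · rw [if_neg hconf, if_neg hconf]
        have hU : ∀ l ∈ (cl.filter (fun c => c.length == 1)).map (fun c => c.headI), l ≠ 0 →
            (-l) ∉ (cl.filter (fun c => c.length == 1)).map (fun c => c.headI) := by
          intro l hl hl0 hneg
          apply hconf
          rcases lt_or_gt_of_ne hl0 with hneg0 | hpos0
          · exact List.any_eq_true.mpr ⟨-l, hneg,
              by simp only [Bool.and_eq_true, decide_eq_true_eq, neg_neg]; exact ⟨by omega, hl⟩⟩
          · exact List.any_eq_true.mpr ⟨l, hl,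
              by simp only [Bool.and_eq_true, decide_eq_true_eq]; exact ⟨hpos0, hneg⟩⟩
        have hfold1 : (cl.filter (fun c => c.length == 1)).foldl
            (fun c u => pvSimpA u.headI c) cl =
            ((cl.filter (fun c => c.length == 1)).map (fun c => c.headI)).foldl
              (fun c l => pvSimpA l c) cl :=
            (List.foldl_map (f := fun c : List Int => c.headI) (g := fun c l => pvSimpA l c)
              (l := cl.filter (fun c => c.length == 1)) (init := cl)).symm
        have hfold2 : (cl.filter (fun c => c.length == 1)).foldl
            (fun a u => a.insert |u.headI| (decide (u.headI > 0))) asg =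
            ((cl.filter (fun c => c.length == 1)).map (fun c => c.headI)).foldl
              (fun a l => a.insert |l| (decide (l > 0))) asg :=
            (List.foldl_map (f := fun c : List Int => c.headI)
              (g := fun (a : PySem.Dict Int Bool) (l : Int) => a.insert |l| (decide (l > 0)))
              (l := cl.filter (fun c => c.length == 1)) (init := asg)).symm
        rw [hfold1, hfold2, pvFoldl_simpA _ _ hU]
        set U := (cl.filter (fun c => c.length == 1)).map (fun c => c.headI) with hUdef
        set asg' := U.foldl (fun a l => a.insert |l| (decide (l > 0))) asg with hasg'
        set cl' := (cl.filter (fun c => !(c.any (fun m => decide (m ∈ U))))).map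
          (fun c => c.filter (fun t => !(decide ((-t) ∈ U)))) with hcl'
        change (if (cl'.any fun c => c.length == 0) = true
            then (((none : Option (List (Int × Bool))), ([] : List (List Int))))
            else pvLoopA f asg' cl') = _
        by_cases hemp2 : (cl'.any (fun c => c.length == 0)) = true
        · rw [if_pos hemp2, if_pos hemp2]
        · rw [if_neg hemp2, if_neg hemp2]
          exact ih asg' cl' (pvInv_step U asg cl hInv)

-- ===== VERDICT (by name: the statement is the Claim_ definition above) =====
theorem propagate_units_spec : Claim_equal_propagate_units := by
  intro clauses _
  unfold Spec_propagate_units propagate_units propagate_units_alt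
  exact pvLoop_eq _ PySem.Dict.empty clauses (fun c _ x _ => PySem.Dict.get?_empty _)
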